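-- pv_equiv track=rewrite | github.com/AdamOtto/Daily-Challenges | Challenge837.py | Rule3Checker
-- ===== SOURCE A (Python) =====
-- def Rule3Checker(ar):
--     hold = []
--     for word in ar:
--         if "," in word:
--             hold.append((word, ","))
--         if ":" in word:
--             hold.append((word, ":"))
--         if ";" in word:
--             hold.append((word, ";"))
--         if "." in word:
--             hold.append((word, "."))
--         if "?" in word:
--             hold.append((word, "?"))
--         if "!" in word:
--             hold.append((word, "!"))
--     retVal = True
--     for i in hold:
--         if not Rule3CheckerHelper(i[0], i[1]):
--             retVal = False
--     return retVal
--
-- def Rule3CheckerHelper(ar, symbol):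
--     i = ar.find(symbol)
--     if i == len(ar) - 1:
--         return True
--     return False
-- ===== SOURCE B (Python) =====
-- PUNCT = set(",:;.?!")
--
-- def Rule3Checker(ar):
--     for word in ar:
--         for ch in word[:-1]:
--             if ch in PUNCT:
--                 return False
--     return True
-- ===== Notes on version B (the rewrite author's own statement) =====
-- stated objective: simpler
-- what changed: Instead of collecting (word, symbol) pairs for six containment tests and then re-running find on each pair, B scans each word's characters except the last once and rejects immediately on any punctuation there.
import Mathlib
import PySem

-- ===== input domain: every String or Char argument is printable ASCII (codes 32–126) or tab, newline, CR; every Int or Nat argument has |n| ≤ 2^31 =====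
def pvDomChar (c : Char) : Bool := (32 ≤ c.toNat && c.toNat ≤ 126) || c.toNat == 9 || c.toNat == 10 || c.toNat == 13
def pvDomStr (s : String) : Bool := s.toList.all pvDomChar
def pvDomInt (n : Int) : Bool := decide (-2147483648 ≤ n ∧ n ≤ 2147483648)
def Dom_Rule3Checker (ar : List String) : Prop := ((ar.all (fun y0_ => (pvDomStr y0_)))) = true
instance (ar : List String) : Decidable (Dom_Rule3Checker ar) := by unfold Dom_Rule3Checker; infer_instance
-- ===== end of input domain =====

-- B replaces A's collect-pairs-then-find scheme by a single scan of each word's characters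
-- except the last, rejecting on any punctuation found there (simpler, one pass, early exit).

-- ===== PORT A =====
def Rule3CheckerHelper (ar : String) (symbol : String) : Bool :=
  let i := PySem.Str.find ar symbol
  if i == PySem.Str.len ar - 1 then true else false

def Rule3Checker (ar : List String) : Bool :=
  let hold := ar.foldl (fun hold word =>
    let hold := if PySem.Str.isIn "," word then hold ++ [(word, ",")] else hold
    let hold := if PySem.Str.isIn ":" word then hold ++ [(word, ":")] else hold
    let hold := if PySem.Str.isIn ";" word then hold ++ [(word, ";")] else hold
    let hold := if PySem.Str.isIn "." word then hold ++ [(word, ".")] else hold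
    let hold := if PySem.Str.isIn "?" word then hold ++ [(word, "?")] else hold
    let hold := if PySem.Str.isIn "!" word then hold ++ [(word, "!")] else hold
    hold) []
  hold.foldl (fun retVal i =>
    if !(Rule3CheckerHelper i.1 i.2) then false else retVal) true

-- ===== PORT B =====
def pPUNCT : PySem.Set Char := PySem.Set.ofList (",:;.?!").toList

def Rule3Checker_alt (ar : List String) : Bool :=
  ar.all (fun word =>
    (PySem.List.slice word.toList none (some (-1))).all (fun ch =>
      !(PySem.Set.contains pPUNCT ch)))

-- ===== PRECONDITION & SPEC =====
def Spec_Rule3Checker (ar : List String) (out : Bool) : Prop := out = Rule3Checker_alt ar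
instance (ar : List String) (out : Bool) : Decidable (Spec_Rule3Checker ar out) := by unfold Spec_Rule3Checker; infer_instance

-- ===== CLAIM (what is proved, stated in full; the proofs are below) =====
def Claim_equal_Rule3Checker : Prop := ∀ (ar : List String), Dom_Rule3Checker ar → Spec_Rule3Checker ar (Rule3Checker ar)

-- ===== LEMMAS AND PROOFS =====

-- the pairs A's first loop contributes for one word
def pvPairs (word : String) : List (String × String) :=
  (if PySem.Str.isIn "," word then [(word, ",")] else [])
  ++ (if PySem.Str.isIn ":" word then [(word, ":")] else [])
  ++ (if PySem.Str.isIn ";" word then [(word, ";")] else [])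
  ++ (if PySem.Str.isIn "." word then [(word, ".")] else [])
  ++ (if PySem.Str.isIn "?" word then [(word, "?")] else [])
  ++ (if PySem.Str.isIn "!" word then [(word, "!")] else [])

theorem pvStep_eq (hold : List (String × String)) (word : String) :
    (let hold := if PySem.Str.isIn "," word then hold ++ [(word, ",")] else hold
     let hold := if PySem.Str.isIn ":" word then hold ++ [(word, ":")] else hold
     let hold := if PySem.Str.isIn ";" word then hold ++ [(word, ";")] else hold
     let hold := if PySem.Str.isIn "." word then hold ++ [(word, ".")] else hold
     let hold := if PySem.Str.isIn "?" word then hold ++ [(word, "?")] else hold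
     let hold := if PySem.Str.isIn "!" word then hold ++ [(word, "!")] else hold
     hold) = hold ++ pvPairs word := by
  simp only [pvPairs]
  split_ifs <;> simp

theorem pvFoldl_retVal (hold : List (String × String)) (b : Bool) :
    hold.foldl (fun retVal i => if !(Rule3CheckerHelper i.1 i.2) then false else retVal) b
      = (b && hold.all (fun i => Rule3CheckerHelper i.1 i.2)) := by
  induction hold generalizing b with
  | nil => simp
  | cons h t ih =>
      simp only [List.foldl_cons, List.all_cons, ih]
      cases Rule3CheckerHelper h.1 h.2 <;> simp

-- find.go on a single-char needle is findIdx? shifted by the start index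
theorem pvGo_eq (c : Char) (l : List Char) (k : Nat) :
    PySem.Chars.find.go [c] l k
      = (match l.findIdx? (· == c) with
         | some i => ((k + i : Nat) : Int)
         | none => -1) := by
  induction l generalizing k with
  | nil => simp [PySem.Chars.find.go]
  | cons h t ih =>
      rw [PySem.Chars.find.go]
      by_cases hc : h = c
      · subst hc
        simp [List.isPrefixOf, List.findIdx?_cons]
      · have h1 : List.isPrefixOf [c] (h :: t) = false := by
          simp [List.isPrefixOf]; exact fun hcontr => (hc hcontr.symm)
        rw [h1]
        simp only [Bool.false_eq_true, if_false, ih (k + 1), List.findIdx?_cons]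
        have h2 : (h == c) = false := by simp [hc]
        rw [h2]
        cases hfi : t.findIdx? (· == c) <;> simp
        ring

-- the per-word core: "symbol absent, or its first index is the last position"
-- equals "no occurrence of the symbol before the last character"
theorem pvChar_eq (c : Char) (l : List Char) :
    (!(PySem.Chars.isIn [c] l) || (PySem.Chars.find l [c] == (l.length : Int) - 1))
      = l.dropLast.all (fun x => !(x == c)) := by
  simp only [PySem.Chars.isIn, PySem.Chars.find, pvGo_eq]
  cases hfi : l.findIdx? (· == c) with
  | none =>
      have hn := List.findIdx?_eq_none_iff.mp hfi
      simp only []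
      have : ∀ x ∈ l.dropLast, (!(x == c)) = true := by
        intro x hx
        simp [hn x (List.mem_of_mem_dropLast hx)]
      simp [List.all_eq_true.mpr this]
  | some i =>
      obtain ⟨hi, hpi, hprev⟩ := List.findIdx?_eq_some_iff_getElem.mp hfi
      simp only [Nat.zero_add]
      by_cases hlast : i = l.length - 1
      · have hl : ((i : Int) == (l.length : Int) - 1) = true := by
          simp; omega
        rw [hl]
        have : ∀ x ∈ l.dropLast, (!(x == c)) = true := by
          intro x hx
          obtain ⟨j, hj, rfl⟩ := List.mem_iff_getElem.mp hx
          rw [List.getElem_dropLast]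
          have hjlt : j < i := by
            have := hj; rw [List.length_dropLast] at this; omega
          simp [hprev j hjlt]
        simp [List.all_eq_true.mpr this]
      · have hl : ((i : Int) == (l.length : Int) - 1) = false := by
          simp; omega
        rw [hl]
        have hmem : l[i] ∈ l.dropLast := by
          have hi' : i < l.dropLast.length := by
            rw [List.length_dropLast]; omega
          have := List.getElem_dropLast (xs := l) (i := i) hi'
          rw [← this]
          exact List.getElem_mem hi'
        have : l.dropLast.all (fun x => !(x == c)) = false := by
          rw [List.all_eq_false]
          exact ⟨l[i], hmem, by simp [hpi]⟩
        simp [this]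

theorem pvAllIf {a : Type} (b : Bool) (x : a) (f : a -> Bool) :
    (if b = true then [x] else []).all f = (!b || f x) := by
  cases b <;> simp

theorem pvAll_and {a : Type} (l : List a) (p q : a -> Bool) :
    (l.all fun x => p x && q x) = (l.all p && l.all q) := by
  induction l with
  | nil => simp
  | cons h t ih =>
      simp only [List.all_cons, ih]
      cases p h <;> cases q h <;> simp

-- one symbol of A's check, reduced to "no occurrence before the last character"
theorem pvSymbol_eq (w : String) (c : Char) (s : String) (hs : s.toList = [c]) :
    (!(PySem.Str.isIn s w) || Rule3CheckerHelper w s)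
      = w.toList.dropLast.all (fun x => !(x == c)) := by
  have h1 : PySem.Str.isIn s w = PySem.Chars.isIn [c] w.toList := by
    simp [PySem.Str.isIn, hs]
  have h2 : Rule3CheckerHelper w s
      = (PySem.Chars.find w.toList [c] == (w.toList.length : Int) - 1) := by
    unfold Rule3CheckerHelper
    rw [PySem.Str.find_eq, PySem.Str.len_eq, hs]
    cases h : (PySem.Chars.find w.toList [c] == (w.toList.length : Int) - 1) <;>
      simp only [h] <;> simp
  rw [h1, h2, pvChar_eq]

-- one word: A's pair checks equal B's scan of all-but-last characters
theorem pvWord_eq (word : String) :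
    (pvPairs word).all (fun i => Rule3CheckerHelper i.1 i.2)
      = (PySem.List.slice word.toList none (some (-1))).all (fun ch =>
          !(PySem.Set.contains pPUNCT ch)) := by
  have hcontains : (fun ch => !(PySem.Set.contains pPUNCT ch))
      = (fun ch => !(ch == ',') && !(ch == ':') && !(ch == ';') && !(ch == '.')
                   && !(ch == '?') && !(ch == '!')) := by
    funext ch
    simp only [pPUNCT, String.reduceToList, PySem.Set.contains_eq_listContains,
      List.contains_eq_mem, PySem.Set.mem_ofList, List.mem_cons, List.not_mem_nil, or_false,
      Bool.decide_or, Bool.not_or, Bool.beq_eq_decide_eq]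
    ac_rfl
  rw [PySem.List.slice_to_neg_one, hcontains]
  simp only [pvAll_and]
  simp only [pvPairs, List.all_append, pvAllIf]
  rw [pvSymbol_eq word ',' "," rfl, pvSymbol_eq word ':' ":" rfl, pvSymbol_eq word ';' ";" rfl,
      pvSymbol_eq word '.' "." rfl, pvSymbol_eq word '?' "?" rfl, pvSymbol_eq word '!' "!" rfl]

theorem Rule3Checker_eq_all (ar : List String) :
    Rule3Checker ar = ar.all (fun w => (pvPairs w).all (fun i => Rule3CheckerHelper i.1 i.2)) := by
  unfold Rule3Checker
  have h1 : ar.foldl (fun hold word =>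
      let hold := if PySem.Str.isIn "," word then hold ++ [(word, ",")] else hold
      let hold := if PySem.Str.isIn ":" word then hold ++ [(word, ":")] else hold
      let hold := if PySem.Str.isIn ";" word then hold ++ [(word, ";")] else hold
      let hold := if PySem.Str.isIn "." word then hold ++ [(word, ".")] else hold
      let hold := if PySem.Str.isIn "?" word then hold ++ [(word, "?")] else hold
      let hold := if PySem.Str.isIn "!" word then hold ++ [(word, "!")] else hold
      hold) [] = ar.flatMap pvPairs := by
    have h0 : ar.foldl (fun acc x => acc ++ pvPairs x) [] = [] ++ ar.flatMap pvPairs :=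
      PySem.List.foldl_append_eq_flatMap pvPairs ar []
    rw [List.nil_append] at h0
    rw [← h0]
    congr 1
    funext hold word
    exact pvStep_eq hold word
  rw [h1, pvFoldl_retVal, Bool.true_and, List.all_flatMap]

-- ===== VERDICT (by name: the statement is the Claim_ definition above) =====
theorem Rule3Checker_spec : Claim_equal_Rule3Checker := by
  intro ar _
  unfold Spec_Rule3Checker Rule3Checker_alt
  rw [Rule3Checker_eq_all]
  congr 1
  funext w
  exact pvWord_eq w
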